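-- pv_equiv track=rewrite | github.com/BertRaeymaekers/scrapbook | random_projects/pedigree_scripts/pedtodot.py | _filter_ancestor
-- ===== SOURCE A (Python) =====
-- from collections import OrderedDict
--
-- def _filter_ancestor(ancestor, pedigree: dict):
--     filtered = OrderedDict()
--     # This one (if exists in the pedigree)
--     try:
--         filtered.update({ancestor: pedigree[ancestor]})
--     except KeyError:
--         pass
--     # Looking for offspring: looking for all individuals with this as parent
--     for individual, parents in pedigree.items():
--         if ancestor in parents:
--             # Doing this so the order is ancestor first
--             new_filtered = _filter_ancestor(individual, pedigree)
--             new_filtered.update(filtered)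
--             filtered = new_filtered
--     return filtered
-- ===== SOURCE B (Python) =====
-- from collections import OrderedDict
--
-- def _filter_ancestor(ancestor, pedigree: dict):
--     # Build a parent -> children index once, then compute the key order by a
--     # depth-first walk with first-occurrence dedup (insertion-ordered dict used
--     # as an ordered set), and materialise the result dict in one final pass.
--     children = {}
--     for individual, parents in pedigree.items():
--         for p in dict.fromkeys(parents):
--             children.setdefault(p, []).append(individual)
--
--     def order(node):
--         out = {}
--         for child in reversed(children.get(node, [])):
--             for k in order(child):
--                 if k not in out:
--                     out[k] = True
--         if node in pedigree and node not in out: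
--             out[node] = True
--         return list(out)
--
--     return OrderedDict((k, pedigree[k]) for k in order(ancestor))
-- ===== Notes on version B (the rewrite author's own statement) =====
-- stated objective: alternative
-- what changed: B replaces A's per-call scan of the whole pedigree and recursive OrderedDict merging by a parent-to-children index built once, a depth-first walk computing the key order with explicit first-occurrence dedup, and a single final pass building the dict.
import Mathlib
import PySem

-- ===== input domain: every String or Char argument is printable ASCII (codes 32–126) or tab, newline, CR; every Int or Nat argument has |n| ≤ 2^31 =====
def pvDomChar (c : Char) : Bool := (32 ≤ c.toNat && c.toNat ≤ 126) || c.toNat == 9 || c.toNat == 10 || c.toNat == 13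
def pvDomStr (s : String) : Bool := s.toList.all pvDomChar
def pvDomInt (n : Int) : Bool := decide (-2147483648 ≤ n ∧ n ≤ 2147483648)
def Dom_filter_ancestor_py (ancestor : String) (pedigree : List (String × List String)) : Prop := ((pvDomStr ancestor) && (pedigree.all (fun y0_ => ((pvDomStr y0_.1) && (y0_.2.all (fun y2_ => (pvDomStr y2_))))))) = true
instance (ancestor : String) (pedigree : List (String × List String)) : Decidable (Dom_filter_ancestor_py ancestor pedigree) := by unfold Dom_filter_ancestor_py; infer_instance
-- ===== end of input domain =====

-- B replaces A's per-call scan of the whole pedigree and OrderedDict merging by a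
-- parent→children index built once plus a depth-first key-order walk with
-- first-occurrence dedup (objective: alternative).
-- Both ports are fuel-indexed transcriptions of their Python's recursion, called with
-- fuel pedigree.length + 1, which exceeds the recursion depth wherever Python A
-- returns (on a reachable cycle Python A raises RecursionError — excluded by Pre_).

-- ===== PORT A =====
-- new_filtered.update(filtered): iterate filtered's items, d[k] = v each
def faUpdate (tgt src : PySem.Dict String (List String)) : PySem.Dict String (List String) :=
  src.items.foldl (fun d kv => d.insert kv.1 kv.2) tgt

def faRec : Nat → String → List (String × List String) → PySem.Dict String (List String)
  | 0, _, _ => PySem.Dict.empty   -- fuel exhausted: never reached where Python A returns (Pre_)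
  | fuel+1, ancestor, pedigree =>
    -- try: filtered.update({ancestor: pedigree[ancestor]}) except KeyError: pass
    let filtered : PySem.Dict String (List String) :=
      match (PySem.Dict.mk pedigree).get? ancestor with
      | some v => PySem.Dict.empty.insert ancestor v
      | none => PySem.Dict.empty
    -- for individual, parents in pedigree.items(): … (items() = the list itself; keys unique under Pre_)
    pedigree.foldl (fun filtered kv =>
      if kv.2.contains ancestor then
        faUpdate (faRec fuel kv.1 pedigree) filtered   -- new_filtered.update(filtered); filtered = new_filtered
      else filtered) filtered

def filter_ancestor_py (ancestor : String) (pedigree : List (String × List String)) : List (String × List String) :=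
  (faRec (pedigree.length + 1) ancestor pedigree).items

-- ===== PORT B =====
-- children.setdefault(p, []).append(individual) over dict.fromkeys(parents)
def fbChildren (pedigree : List (String × List String)) : PySem.Dict String (List String) :=
  pedigree.foldl (fun ch kv =>
    (PySem.List.dedup kv.2).foldl (fun ch p => ch.insert p (ch.getD p [] ++ [kv.1])) ch)
    PySem.Dict.empty

-- order(node): 'out' is an insertion-ordered dict used as an ordered set → PySem.Set
def fbOrder : Nat → String → PySem.Dict String (List String) → List (String × List String) → PySem.Set String
  | 0, _, _, _ => []   -- fuel exhausted: same bound as port A; never reached where Python A returns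
  | fuel+1, node, children, pedigree =>
    let out : PySem.Set String :=
      ((children.getD node []).reverse).foldl
        (fun out child => (fbOrder fuel child children pedigree).foldl PySem.Set.add out) []
    -- if node in pedigree and node not in out: out[node] = True
    if (PySem.Dict.mk pedigree).contains node then PySem.Set.add out node else out

-- OrderedDict((k, pedigree[k]) for k in order(ancestor)); every k produced by order
-- is a key of pedigree, so the total getD computes exactly pedigree[k] there.
def filter_ancestor_py_alt (ancestor : String) (pedigree : List (String × List String)) : List (String × List String) :=
  (fbOrder (pedigree.length + 1) ancestor (fbChildren pedigree) pedigree).map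
    (fun k => (k, (PySem.Dict.mk pedigree).getD k []))

-- ===== PRECONDITION & SPEC =====
-- direct children of p: the individuals listing p among their parents, in pedigree order
def pvChildrenOf (pedigree : List (String × List String)) (p : String) : List String :=
  (pedigree.filter (fun kv => kv.2.contains p)).map (·.1)

-- nodes reachable from the set s in at most n child steps
def pvReach (pedigree : List (String × List String)) : Nat → PySem.Set String → PySem.Set String
  | 0, s => s
  | n+1, s => pvReach pedigree n (PySem.Set.update s (s.flatMap (pvChildrenOf pedigree)))

-- Pre_ excludes (i) pedigree lists with duplicate ids, which collapse in the Python dict so the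
-- list does not denote a dict input, and (ii) pedigrees with a child-relation cycle reachable
-- from ancestor, on which Python A recurses forever (RecursionError).
-- (The ports themselves agree on ALL inputs; the equality proof below does not need Pre_.)
def Pre_filter_ancestor_py (ancestor : String) (pedigree : List (String × List String)) : Prop :=
  (pedigree.map Prod.fst).Nodup ∧
  ∀ x ∈ pvReach pedigree pedigree.length (PySem.Set.ofList [ancestor]),
    x ∉ pvReach pedigree pedigree.length (PySem.Set.ofList (pvChildrenOf pedigree x))

instance (ancestor : String) (pedigree : List (String × List String)) : Decidable (Pre_filter_ancestor_py ancestor pedigree) := by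
  unfold Pre_filter_ancestor_py; infer_instance

def pvWitness_filter_ancestor_py : String × (List (String × List String)) :=
  ("a", [("a", []), ("b", ["a"]), ("c", ["a", "b"])])

def Spec_filter_ancestor_py (ancestor : String) (pedigree : List (String × List String)) (out : List (String × List String)) : Prop := out = filter_ancestor_py_alt ancestor pedigree
instance (ancestor : String) (pedigree : List (String × List String)) (out : List (String × List String)) : Decidable (Spec_filter_ancestor_py ancestor pedigree out) := by unfold Spec_filter_ancestor_py; infer_instance

-- ===== CLAIM (what is proved, stated in full; the proofs are below) =====
def Claim_equal_filter_ancestor_py : Prop := ∀ (ancestor : String) (pedigree : List (String × List String)), Dom_filter_ancestor_py ancestor pedigree → Pre_filter_ancestor_py ancestor pedigree → Spec_filter_ancestor_py ancestor pedigree (filter_ancestor_py ancestor pedigree)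

-- ===== LEMMAS AND PROOFS =====

-- the value any key k carries anywhere in A's result: first-match lookup in pedigree
def pvVal (pedigree : List (String × List String)) (k : String) : List String :=
  (PySem.Dict.mk pedigree).getD k []

-- a dict whose pairs are determined by their keys
def pvToD (pedigree : List (String × List String)) (l : List String) : PySem.Dict String (List String) :=
  PySem.Dict.mk (l.map (fun k => (k, pvVal pedigree k)))

-- the element loop 'for k in xs: add' is Set.update (definitional)
theorem pv_fold_add_eq_update (s : PySem.Set String) (xs : List String) :
    xs.foldl PySem.Set.add s = PySem.Set.update s xs := rfl

theorem pv_update_add (acc d : List String) (y : String) :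
    PySem.Set.update acc (PySem.Set.add d y) = PySem.Set.add (PySem.Set.update acc d) y := by
  by_cases h : y ∈ d
  · rw [PySem.Set.add_of_mem h, PySem.Set.add_of_mem (show y ∈ PySem.Set.update acc d by simp [PySem.Set.mem_update, h])]
  · rw [PySem.Set.add_of_not_mem h, PySem.Set.update_append, PySem.Set.update_cons,
      PySem.Set.update_nil]

theorem pv_update_update (ys : List String) : ∀ (d acc : List String),
    PySem.Set.update acc (PySem.Set.update d ys) = PySem.Set.update (PySem.Set.update acc d) ys := by
  induction ys with
  | nil => intro d acc; rw [PySem.Set.update_nil, PySem.Set.update_nil]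
  | cons y ys ih =>
    intro d acc
    rw [PySem.Set.update_cons, ih, pv_update_add, ← PySem.Set.update_cons]

-- inserting (k, pvVal k) into a key-determined dict is Set.add on the key list
theorem pv_insert_toD (ped : List (String × List String)) (l : List String) (k : String) :
    (pvToD ped l).insert k (pvVal ped k) = pvToD ped (PySem.Set.add l k) := by
  by_cases h : k ∈ l
  · have hc : (pvToD ped l).contains k = true := by
      simp [pvToD, PySem.Dict.contains_eq_decide_mem_keys, PySem.Dict.keys_mk, h]
    rw [PySem.Set.add_of_mem h]
    apply PySem.Dict.ext
    rw [PySem.Dict.items_insert_of_contains _ _ hc]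
    show ((l.map fun k' => (k', pvVal ped k')).map
        (fun p => if p.1 == k then (k, pvVal ped k) else p)) = l.map fun k' => (k', pvVal ped k')
    rw [List.map_map]
    apply List.map_congr_left
    intro x _
    by_cases hxk : x = k
    · subst hxk; simp
    · simp [hxk]
  · have hc : (pvToD ped l).contains k = false := by
      simp [pvToD, PySem.Dict.contains_eq_decide_mem_keys, PySem.Dict.keys_mk, h]
    rw [PySem.Set.add_of_not_mem h]
    apply PySem.Dict.ext
    rw [PySem.Dict.items_insert_of_not_contains _ _ hc]
    simp [pvToD]

-- A's dict merge is Set.update on the key lists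
theorem pv_faUpdate_toD (ped : List (String × List String)) : ∀ (l2 l1 : List String),
    faUpdate (pvToD ped l1) (pvToD ped l2) = pvToD ped (PySem.Set.update l1 l2) := by
  intro l2
  induction l2 with
  | nil => intro l1; rfl
  | cons k l2 ih =>
    intro l1
    show ((k :: l2).map (fun k => (k, pvVal ped k))).foldl
        (fun d kv => d.insert kv.1 kv.2) (pvToD ped l1) = _
    simp only [List.map_cons, List.foldl_cons]
    rw [pv_insert_toD]
    rw [show ((l2.map (fun k => (k, pvVal ped k))).foldl (fun d kv => d.insert kv.1 kv.2)
        (pvToD ped (PySem.Set.add l1 k)))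
      = faUpdate (pvToD ped (PySem.Set.add l1 k)) (pvToD ped l2) from rfl]
    rw [ih, PySem.Set.update_cons]

-- one pedigree entry's effect on the children index
theorem pv_children_step (x : String) : ∀ (s : List String), s.Nodup →
    ∀ (ch : PySem.Dict String (List String)) (p : String),
    (s.foldl (fun ch q => ch.insert q (ch.getD q [] ++ [x])) ch).getD p []
      = ch.getD p [] ++ (if p ∈ s then [x] else []) := by
  intro s
  induction s with
  | nil => intro _ ch p; simp
  | cons q s ih =>
    intro hnd ch p
    simp only [List.foldl_cons]
    rw [ih hnd.of_cons, PySem.Dict.getD_insert]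
    by_cases hpq : p = q
    · subst hpq
      have hps : p ∉ s := (List.nodup_cons.mp hnd).1
      simp [hps]
    · simp [hpq]

-- the children index computes pvChildrenOf
theorem pv_fbChildren_getD (ped : List (String × List String)) (p : String) :
    (fbChildren ped).getD p [] = pvChildrenOf ped p := by
  induction ped using List.reverseRecOn with
  | nil => simp [fbChildren, pvChildrenOf, PySem.Dict.getD_empty]
  | append_singleton ped e ih =>
    have : fbChildren (ped ++ [e])
        = (PySem.List.dedup e.2).foldl (fun ch p => ch.insert p (ch.getD p [] ++ [e.1]))
            (fbChildren ped) := by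
      simp only [fbChildren, List.foldl_append, List.foldl_cons, List.foldl_nil]
    rw [this, pv_children_step e.1 _ (PySem.List.nodup_dedup _), ih]
    simp only [pvChildrenOf, List.filter_append, List.map_append, PySem.List.mem_dedup]
    by_cases h : p ∈ e.2
    · simp [h]
    · simp [h]

-- updating with a fold-built set = continuing the fold
theorem pv_update_foldl (O : String → List String) : ∀ (l : List String) (s acc : List String),
    PySem.Set.update acc (l.foldl (fun out x => PySem.Set.update out (O x)) s)
      = l.foldl (fun out x => PySem.Set.update out (O x)) (PySem.Set.update acc s) := by
  intro l
  induction l with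
  | nil => intro s acc; rfl
  | cons x l ih =>
    intro s acc
    simp only [List.foldl_cons]
    rw [ih, pv_update_update]

-- A's right-to-left merge order equals B's fold over the reversed children
theorem pv_core (O : String → List String) (hO : ∀ c, PySem.Set.ofList (O c) = O c) :
    ∀ (cs b : List String), PySem.Set.ofList b = b →
    cs.foldl (fun l c => PySem.Set.update (O c) l) b
      = PySem.Set.update (cs.reverse.foldl (fun out c => PySem.Set.update out (O c)) []) b := by
  intro cs
  induction cs using List.reverseRecOn with
  | nil =>
    intro b hb
    rw [List.reverse_nil, List.foldl_nil, List.foldl_nil, PySem.Set.update_nil_left, hb]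
  | append_singleton cs c ih =>
    intro b hb
    rw [List.foldl_append, List.foldl_cons, List.foldl_nil, ih b hb, pv_update_update,
      List.reverse_append]
    simp only [List.reverse_cons, List.reverse_nil, List.nil_append, List.singleton_append,
      List.foldl_cons]
    rw [PySem.Set.update_nil_left, hO c, pv_update_foldl, PySem.Set.update_nil]

theorem pv_foldl_update_nodup (O : String → List String) : ∀ (l : List String)
    (acc : PySem.Set String), acc.Nodup →
    (l.foldl (fun out x => PySem.Set.update out (O x)) acc).Nodup := by
  intro l
  induction l with
  | nil => intro acc h; exact h
  | cons x l ih =>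
    intro acc h
    simp only [List.foldl_cons]
    exact ih _ (PySem.Set.nodup_update _ _ h)

theorem pv_fbOrder_nodup (ch : PySem.Dict String (List String))
    (ped : List (String × List String)) (fuel : Nat) (a : String) :
    (fbOrder fuel a ch ped).Nodup := by
  cases fuel with
  | zero => simp [fbOrder]
  | succ fuel =>
    simp only [fbOrder, pv_fold_add_eq_update]
    have h := pv_foldl_update_nodup (fun c => fbOrder fuel c ch ped)
      ((ch.getD a []).reverse) [] List.nodup_nil
    split
    · exact PySem.Set.nodup_add _ _ h
    · exact h

-- A's loop over all entries keeping the matching ones is a loop over pvChildrenOf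
theorem pv_foldl_children {β : Type} (ped : List (String × List String)) (a : String)
    (F : β → String → β) (init : β) :
    ped.foldl (fun d kv => if kv.2.contains a then F d kv.1 else d) init
      = (pvChildrenOf ped a).foldl F init := by
  simp only [pvChildrenOf, List.foldl_map, List.foldl_filter]

-- main invariant: at every fuel, A's dict is B's key order mapped through pvVal
theorem pv_main (ped : List (String × List String)) :
    ∀ fuel a, faRec fuel a ped = pvToD ped (fbOrder fuel a (fbChildren ped) ped) := by
  intro fuel
  induction fuel with
  | zero => intro a; rfl
  | succ fuel ih =>
    intro a
    have hO : ∀ c, PySem.Set.ofList (fbOrder fuel c (fbChildren ped) ped)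
        = fbOrder fuel c (fbChildren ped) ped :=
      fun c => PySem.Set.ofList_eq_self_of_nodup _ (pv_fbOrder_nodup _ _ _ _)
    have hfold : ∀ (cs l : List String),
        cs.foldl (fun d c => faUpdate (faRec fuel c ped) d) (pvToD ped l)
          = pvToD ped (cs.foldl
              (fun l c => PySem.Set.update (fbOrder fuel c (fbChildren ped) ped) l) l) := by
      intro cs
      induction cs with
      | nil => intro l; rfl
      | cons c cs ihc =>
        intro l
        simp only [List.foldl_cons]
        rw [ih c, pv_faUpdate_toD, ihc]
    have hB : fbOrder (fuel+1) a (fbChildren ped) ped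
        = (if (PySem.Dict.mk ped).contains a then
            PySem.Set.add ((pvChildrenOf ped a).reverse.foldl
              (fun out c => PySem.Set.update out (fbOrder fuel c (fbChildren ped) ped)) []) a
          else (pvChildrenOf ped a).reverse.foldl
              (fun out c => PySem.Set.update out (fbOrder fuel c (fbChildren ped) ped)) []) := by
      simp only [fbOrder, pv_fbChildren_getD, pv_fold_add_eq_update]
    cases hg : (PySem.Dict.mk ped).get? a with
    | some v =>
      have hca : (PySem.Dict.mk ped).contains a = true := by
        rw [PySem.Dict.contains_eq_isSome_get?, hg]; rfl
      have hval : pvVal ped a = v := by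
        simp [pvVal, PySem.Dict.getD_eq_get?_getD, hg]
      have hinit : (PySem.Dict.empty.insert a v : PySem.Dict String (List String))
          = pvToD ped [a] := by
        rw [← hval]; rfl
      have hA : faRec (fuel+1) a ped
          = ped.foldl (fun d kv => if kv.2.contains a then faUpdate (faRec fuel kv.1 ped) d else d)
              (pvToD ped [a]) := by
        simp only [faRec, hg, hinit]
      rw [hA, pv_foldl_children ped a (fun d c => faUpdate (faRec fuel c ped) d), hfold,
        pv_core (fun c => fbOrder fuel c (fbChildren ped) ped) hO _ [a] rfl,
        PySem.Set.update_cons, PySem.Set.update_nil, hB, if_pos hca]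
    | none =>
      have hca : (PySem.Dict.mk ped).contains a = false := by
        rw [PySem.Dict.contains_eq_isSome_get?, hg]; rfl
      have hA : faRec (fuel+1) a ped
          = ped.foldl (fun d kv => if kv.2.contains a then faUpdate (faRec fuel kv.1 ped) d else d)
              (pvToD ped []) := by
        simp only [faRec, hg]; rfl
      rw [hA, pv_foldl_children ped a (fun d c => faUpdate (faRec fuel c ped) d), hfold,
        pv_core (fun c => fbOrder fuel c (fbChildren ped) ped) hO _ [] rfl,
        PySem.Set.update_nil, hB, if_neg (by simp [hca])]

-- ===== VERDICT (by name: the statement is the Claim_ definition above) =====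
theorem filter_ancestor_py_spec : Claim_equal_filter_ancestor_py := by
  intro a ped _ _
  unfold Spec_filter_ancestor_py filter_ancestor_py filter_ancestor_py_alt
  rw [pv_main ped (ped.length + 1) a]
  simp [pvToD, pvVal]
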